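-- pv_equiv track=rewrite | github.com/papranali81-maker/test123 | regression_generator.py | _find_facility_header_line
-- ===== SOURCE A (Python) =====
-- def _find_facility_header_line(lines: list) -> int:
--     """
--     Heuristic to find header line index for facility PSV files.
--     Looks for common facility column names; falls back to first '|' line.
--     Returns number of lines to skip (i.e. index of header line).
--     """
--     header_keywords = ['facilityid', 'finalsegmentid', 'finallgdrate', 'finalead']
--     for idx, ln in enumerate(lines):
--         low = ln.lower()
--         if '|' in ln:
--             # treat pipe-delimited candidate header: check for keywords
--             tokens = [t.strip().lower() for t in ln.split('|')]
--             # match if any header keyword appears in the joined tokens OR appears in any individual token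
--             if any(k in ' '.join(tokens) for k in header_keywords) or any(k in tok for tok in tokens for k in header_keywords):
--                 return idx
--     # fallback: first line containing '|' (use that as header)
--     for idx, ln in enumerate(lines):
--         if '|' in ln:
--             return idx
--     # nothing found, return 0
--     return 0
-- ===== SOURCE B (Python) =====
-- def _find_facility_header_line(lines: list) -> int:
--     """One-pass version: remembers the first '|' line as fallback while scanning
--     for a keyword header; the redundant per-token check is dropped since any
--     keyword contained in a token is contained in the joined tokens."""
--     header_keywords = ('facilityid', 'finalsegmentid', 'finallgdrate', 'finalead')
--     first_pipe = None
--     for idx, ln in enumerate(lines):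
--         if '|' not in ln:
--             continue
--         if first_pipe is None:
--             first_pipe = idx
--         joined = ' '.join(t.strip().lower() for t in ln.split('|'))
--         if any(k in joined for k in header_keywords):
--             return idx
--     return first_pipe if first_pipe is not None else 0
-- ===== Notes on version B (the rewrite author's own statement) =====
-- stated objective: simpler
-- what changed: Fused A's two sequential scans into a single pass that records the first '|' line as the fallback while scanning, and dropped A's redundant second any() (a keyword inside a token is always inside the space-joined tokens).
import Mathlib
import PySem

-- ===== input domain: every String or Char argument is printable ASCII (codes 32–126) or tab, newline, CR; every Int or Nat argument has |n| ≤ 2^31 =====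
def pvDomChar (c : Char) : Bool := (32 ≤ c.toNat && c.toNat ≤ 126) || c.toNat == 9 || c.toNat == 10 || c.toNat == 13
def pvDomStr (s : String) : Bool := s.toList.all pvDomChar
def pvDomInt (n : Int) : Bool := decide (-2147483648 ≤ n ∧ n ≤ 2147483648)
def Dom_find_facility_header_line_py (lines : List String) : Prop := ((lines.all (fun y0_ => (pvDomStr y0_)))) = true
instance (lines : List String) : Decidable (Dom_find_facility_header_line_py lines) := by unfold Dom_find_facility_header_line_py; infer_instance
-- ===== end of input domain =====

-- B fuses A's two scans into one pass with a first-pipe fallback accumulator and drops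
-- A's redundant second any(); equivalence of the return value is proved on all inputs.

-- ===== PORT A =====
def pvKeywordsA : List (List Char) :=
  ["facilityid".toList, "finalsegmentid".toList, "finallgdrate".toList, "finalead".toList]

-- A's per-line keyword test: tokens = [t.strip().lower() for t in ln.split('|')];
-- any(k in ' '.join(tokens) …) or any(k in tok for tok in tokens for k in …)
def pvCheckA (ln : String) : Bool :=
  let tokens := (PySem.Chars.splitOn ln.toList ['|']).map
      (fun t => PySem.Chars.lower (PySem.Chars.strip t))
  (pvKeywordsA.any fun k => PySem.Chars.isIn k (PySem.Chars.join [' '] tokens)) ||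
  (tokens.any fun tok => pvKeywordsA.any fun k => PySem.Chars.isIn k tok)

-- first loop: first idx whose line contains '|' AND passes the keyword check
def pvLoopA1 (lines : List String) (idx : Int) : Option Int :=
  match lines with
  | [] => none
  | ln :: rest =>
    if PySem.Str.isIn "|" ln then
      if pvCheckA ln then some idx else pvLoopA1 rest (idx + 1)
    else pvLoopA1 rest (idx + 1)

-- second loop: first idx whose line contains '|'
def pvLoopA2 (lines : List String) (idx : Int) : Option Int :=
  match lines with
  | [] => none
  | ln :: rest =>
    if PySem.Str.isIn "|" ln then some idx else pvLoopA2 rest (idx + 1)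

def find_facility_header_line_py (lines : List String) : Int :=
  match pvLoopA1 lines 0 with
  | some i => i
  | none =>
    match pvLoopA2 lines 0 with
    | some i => i
    | none => 0

-- ===== PORT B =====
def pvKeywordsB : List (List Char) :=
  ["facilityid".toList, "finalsegmentid".toList, "finallgdrate".toList, "finalead".toList]

-- B's per-line test: keyword in the space-joined stripped-lowered tokens only
def pvCheckB (ln : String) : Bool :=
  let joined := PySem.Chars.join [' ']
      ((PySem.Chars.splitOn ln.toList ['|']).map
        (fun t => PySem.Chars.lower (PySem.Chars.strip t)))
  pvKeywordsB.any fun k => PySem.Chars.isIn k joined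

-- single pass carrying the first-pipe fallback
def pvLoopB (lines : List String) (idx : Int) (firstPipe : Option Int) : Int :=
  match lines with
  | [] => firstPipe.getD 0
  | ln :: rest =>
    if PySem.Str.isIn "|" ln then
      let fp := firstPipe.getD idx
      if pvCheckB ln then idx else pvLoopB rest (idx + 1) (some fp)
    else pvLoopB rest (idx + 1) firstPipe

def find_facility_header_line_py_alt (lines : List String) : Int :=
  pvLoopB lines 0 none

-- ===== PRECONDITION & SPEC =====
def Spec_find_facility_header_line_py (lines : List String) (out : Int) : Prop := out = find_facility_header_line_py_alt lines
instance (lines : List String) (out : Int) : Decidable (Spec_find_facility_header_line_py lines out) := by unfold Spec_find_facility_header_line_py; infer_instance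

-- ===== CLAIM (what is proved, stated in full; the proofs are below) =====
def Claim_equal_find_facility_header_line_py : Prop := ∀ (lines : List String), Dom_find_facility_header_line_py lines → Spec_find_facility_header_line_py lines (find_facility_header_line_py lines)

-- ===== LEMMAS AND PROOFS =====

-- every member of a list of chunks is an infix of their join
lemma pv_mem_infix_join (sep tok : List Char) :
    ∀ ts : List (List Char), tok ∈ ts → tok <:+: PySem.Chars.join sep ts := by
  intro ts
  induction ts with
  | nil => intro h; cases h
  | cons a rest ih =>
    intro h
    rcases List.mem_cons.mp h with rfl | h
    · cases rest with
      | nil => rw [PySem.Chars.join_singleton]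
      | cons b rs =>
        rw [PySem.Chars.join_cons_cons, List.append_assoc]
        exact (List.prefix_append tok _).isInfix
    · cases rest with
      | nil => cases h
      | cons b rs =>
        rw [PySem.Chars.join_cons_cons]
        exact (ih h).trans (List.suffix_append _ _).isInfix

-- A's double-any equals B's single joined-string test
lemma pv_check_eq (ln : String) : pvCheckA ln = pvCheckB ln := by
  unfold pvCheckA pvCheckB pvKeywordsA pvKeywordsB
  set ts := (PySem.Chars.splitOn ln.toList ['|']).map
      (fun t => PySem.Chars.lower (PySem.Chars.strip t)) with hts
  set ks := ["facilityid".toList, "finalsegmentid".toList, "finallgdrate".toList,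
      "finalead".toList] with hks
  cases hj : (ks.any fun k => PySem.Chars.isIn k (PySem.Chars.join [' '] ts)) with
  | true => simp [hj]
  | false =>
    simp only [hj, Bool.false_or]
    cases htokany : (ts.any fun tok => ks.any fun k => PySem.Chars.isIn k tok) with
    | false => rfl
    | true =>
      exfalso
      obtain ⟨tok, htok, hany⟩ := List.any_eq_true.mp htokany
      obtain ⟨k, hk, hin⟩ := List.any_eq_true.mp hany
      have hkj : PySem.Chars.isIn k (PySem.Chars.join [' '] ts) = true :=
        (PySem.Chars.isIn_iff_infix _ _).mpr
          (((PySem.Chars.isIn_iff_infix _ _).mp hin).trans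
            (pv_mem_infix_join [' '] tok ts htok))
      have : (ks.any fun k => PySem.Chars.isIn k (PySem.Chars.join [' '] ts)) = true :=
        List.any_eq_true.mpr ⟨k, hk, hkj⟩
      rw [hj] at this
      cases this

-- loop fusion: B's single pass computes A's two-pass result
lemma pv_fuse (lines : List String) :
    ∀ (idx : Int) (fp : Option Int),
      pvLoopB lines idx fp =
        match pvLoopA1 lines idx with
        | some i => i
        | none =>
          match fp with
          | some j => j
          | none =>
            match pvLoopA2 lines idx with
            | some i => i
            | none => 0 := by
  induction lines with
  | nil => intro idx fp; cases fp <;> simp [pvLoopB, pvLoopA1, pvLoopA2]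
  | cons ln rest ih =>
    intro idx fp
    cases hp : PySem.Str.isIn "|" ln with
    | true =>
      cases hc : pvCheckA ln with
      | true =>
        have hcB : pvCheckB ln = true := pv_check_eq ln ▸ hc
        simp only [pvLoopB, pvLoopA1, hp, hcB, hc, if_true]
      | false =>
        have hcB : pvCheckB ln = false := pv_check_eq ln ▸ hc
        simp only [pvLoopB, pvLoopA1, pvLoopA2, hp, hc, hcB, if_true, Bool.false_eq_true,
          if_false]
        rw [ih (idx + 1) (some (fp.getD idx))]
        cases fp <;> simp [Option.getD]
    | false =>
      simp only [pvLoopB, pvLoopA1, pvLoopA2, hp, Bool.false_eq_true, if_false]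
      exact ih (idx + 1) fp

-- ===== VERDICT (by name: the statement is the Claim_ definition above) =====
theorem find_facility_header_line_py_spec : Claim_equal_find_facility_header_line_py := by
  intro lines _
  unfold Spec_find_facility_header_line_py find_facility_header_line_py find_facility_header_line_py_alt
  rw [pv_fuse lines 0 none]
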